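-- pv_equiv track=rewrite | github.com/Aasthaengg/IBMdataset | Python_codes/p03762/s156839425.py | get_diffsum
-- ===== SOURCE A (Python) =====
-- def get_diffsum(X, M):
--   left_sum = sum(X)
--   left_count = len(X)
--   ans = 0
--   for x in X:
--     left_sum -= x
--     left_count -= 1
--     ans += left_sum - left_count * x
--     ans %= M
--   return ans
-- ===== SOURCE B (Python) =====
-- def get_diffsum(X, M):
--     n = len(X)
--     ans = 0
--     for i, x in enumerate(X):
--         ans += (2 * i - (n - 1)) * x
--         ans %= M
--     return ans
-- ===== Notes on version B (the rewrite author's own statement) =====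
-- stated objective: alternative
-- what changed: Replaces A's running suffix-sum/suffix-count state with a stateless index-coefficient formula: each element contributes (2*i-(n-1))*X[i], accumulated with the same per-iteration mod.
import Mathlib
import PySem

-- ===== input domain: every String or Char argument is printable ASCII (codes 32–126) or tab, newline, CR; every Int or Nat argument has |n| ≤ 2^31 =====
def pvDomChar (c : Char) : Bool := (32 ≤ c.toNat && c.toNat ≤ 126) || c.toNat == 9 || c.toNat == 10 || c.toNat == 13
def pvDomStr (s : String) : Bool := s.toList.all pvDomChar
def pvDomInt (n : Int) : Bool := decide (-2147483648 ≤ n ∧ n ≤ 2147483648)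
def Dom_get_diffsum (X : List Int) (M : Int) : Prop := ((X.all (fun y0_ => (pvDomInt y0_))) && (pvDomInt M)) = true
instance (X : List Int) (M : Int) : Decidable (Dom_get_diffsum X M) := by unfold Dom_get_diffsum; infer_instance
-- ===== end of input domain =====

-- B drops A's running suffix-sum/suffix-count state and instead gives each element the
-- closed index coefficient (2*i-(n-1)), with the same per-iteration mod (alternative decomposition).

-- ===== PORT A =====
def get_diffsum (X : List Int) (M : Int) : Int :=
  (X.foldl (fun st x =>
      let left_sum := st.1 - x
      let left_count := st.2.1 - 1
      let ans := PySem.Int.mod (st.2.2 + (left_sum - left_count * x)) M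
      (left_sum, (left_count, ans)))
    (X.sum, ((X.length : Int), 0))).2.2

-- ===== PORT B =====
def get_diffsum_alt (X : List Int) (M : Int) : Int :=
  let n : Int := X.length
  (PySem.List.enumerate X).foldl
    (fun ans p => PySem.Int.mod (ans + (2 * p.1 - (n - 1)) * p.2) M) 0

-- ===== PRECONDITION & SPEC =====
-- Python A raises ZeroDivisionError on 'ans %= M' when M = 0 and X is nonempty (B raises there too).
def Pre_get_diffsum (X : List Int) (M : Int) : Prop := X = [] ∨ M ≠ 0
instance (X : List Int) (M : Int) : Decidable (Pre_get_diffsum X M) := by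
  unfold Pre_get_diffsum; infer_instance
def pvWitness_get_diffsum : List Int × Int := ([3, -1, 4, 1], 7)

def Spec_get_diffsum (X : List Int) (M : Int) (out : Int) : Prop := out = get_diffsum_alt X M
instance (X : List Int) (M : Int) (out : Int) : Decidable (Spec_get_diffsum X M out) := by
  unfold Spec_get_diffsum; infer_instance

-- ===== CLAIM (what is proved, stated in full; the proofs are below) =====
def Claim_equal_get_diffsum : Prop := ∀ (X : List Int) (M : Int), Dom_get_diffsum X M → Pre_get_diffsum X M → Spec_get_diffsum X M (get_diffsum X M)

-- ===== LEMMAS AND PROOFS =====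

-- sum of A's per-iteration increments, from suffix-sum s and suffix-count c
def tsumA : Int → Int → List Int → Int
  | _, _, [] => 0
  | s, c, x :: xs => ((s - x) - (c - 1) * x) + tsumA (s - x) (c - 1) xs

-- sum of B's per-iteration increments, from start index k with fixed n
def tsumB : Int → Int → List Int → Int
  | _, _, [] => 0
  | k, n, x :: xs => (2 * k - (n - 1)) * x + tsumB (k + 1) n xs

theorem foldA_eq (M : Int) :
    ∀ (X : List Int) (s c a : Int),
      (X.foldl (fun st x =>
          let left_sum := st.1 - x
          let left_count := st.2.1 - 1
          let ans := PySem.Int.mod (st.2.2 + (left_sum - left_count * x)) M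
          (left_sum, (left_count, ans)))
        (s, (c, PySem.Int.mod a M))).2.2 = PySem.Int.mod (a + tsumA s c X) M := by
  intro X
  induction X with
  | nil => intro s c a; simp [tsumA]
  | cons x xs ih =>
    intro s c a
    show (xs.foldl _ (s - x, (c - 1,
        PySem.Int.mod (PySem.Int.mod a M + ((s - x) - (c - 1) * x)) M))).2.2 = _
    rw [show PySem.Int.mod (PySem.Int.mod a M + ((s - x) - (c - 1) * x)) M
        = PySem.Int.mod (a + ((s - x) - (c - 1) * x)) M from Int.fmod_add_fmod ..]
    rw [ih (s - x) (c - 1) (a + ((s - x) - (c - 1) * x))]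
    simp [tsumA]; ring_nf

theorem foldB_eq (M n : Int) :
    ∀ (X : List Int) (k a : Int),
      ((PySem.List.enumerate X k).foldl
          (fun ans p => PySem.Int.mod (ans + (2 * p.1 - (n - 1)) * p.2) M)
          (PySem.Int.mod a M)) = PySem.Int.mod (a + tsumB k n X) M := by
  intro X
  induction X with
  | nil => intro k a; simp [tsumB, PySem.List.enumerate_nil]
  | cons x xs ih =>
    intro k a
    rw [PySem.List.enumerate_cons]
    show (PySem.List.enumerate xs (k + 1)).foldl _
        (PySem.Int.mod (PySem.Int.mod a M + (2 * k - (n - 1)) * x) M) = _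
    rw [show PySem.Int.mod (PySem.Int.mod a M + (2 * k - (n - 1)) * x) M
        = PySem.Int.mod (a + (2 * k - (n - 1)) * x) M from Int.fmod_add_fmod ..]
    rw [ih (k + 1) (a + (2 * k - (n - 1)) * x)]
    simp [tsumB]; ring_nf

theorem tsumB_pred : ∀ (xs : List Int) (k n : Int),
    tsumB k (n - 1) xs = tsumB k n xs + xs.sum := by
  intro xs
  induction xs with
  | nil => intro k n; simp [tsumB]
  | cons x xs ih => intro k n; simp [tsumB, ih (k + 1) n]; ring

theorem tsumB_shift : ∀ (xs : List Int) (k n : Int),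
    tsumB (k + 1) n xs = tsumB k (n - 2) xs := by
  intro xs
  induction xs with
  | nil => intro k n; simp [tsumB]
  | cons x xs ih =>
    intro k n
    simp only [tsumB]
    rw [ih (k + 1) n]
    ring

theorem tsum_main : ∀ (X : List Int),
    tsumA X.sum (X.length : Int) X = tsumB 0 (X.length : Int) X := by
  intro X
  induction X with
  | nil => rfl
  | cons x xs ih =>
    show ((x + xs.sum - x) - (((xs.length : Int) + 1) - 1) * x)
        + tsumA (x + xs.sum - x) (((xs.length : Int) + 1) - 1) xs
        = (2 * 0 - (((xs.length : Int) + 1) - 1)) * x + tsumB (0 + 1) ((xs.length : Int) + 1) xs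
    rw [show (x + xs.sum - x) = xs.sum by ring,
        show (((xs.length : Int) + 1) - 1) = (xs.length : Int) by ring, ih]
    rw [show (0 : Int) + 1 = 0 + 1 from rfl, tsumB_shift,
        show ((xs.length : Int) + 1 - 2) = ((xs.length : Int) - 1) by ring, tsumB_pred]
    ring

-- ===== VERDICT (by name: the statement is the Claim_ definition above) =====
theorem get_diffsum_spec : Claim_equal_get_diffsum := by
  intro X M _ _
  unfold Spec_get_diffsum get_diffsum get_diffsum_alt
  have hA := foldA_eq M X X.sum (X.length : Int) 0
  have hB := foldB_eq M (X.length : Int) X 0 0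
  simp only [show PySem.Int.mod 0 M = 0 from Int.zero_fmod M, zero_add] at hA hB
  rw [hA, hB, tsum_main]
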